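-- pv_equiv track=rewrite | github.com/xyleth/desloppify | desloppify/narrative/strategy.py | _group_by_file_overlap
-- ===== SOURCE A (Python) =====
-- def _group_by_file_overlap(
--     action_files: list[tuple[dict, set[str]]],
-- ) -> list[list[tuple[dict, set[str]]]]:
--     """Group actions whose file sets overlap using union-find."""
--     n = len(action_files)
--     if n == 0:
--         return []
--
--     parent = list(range(n))
--
--     def find(x: int) -> int:
--         while parent[x] != x:
--             parent[x] = parent[parent[x]]
--             x = parent[x]
--         return x
--
--     def union(a: int, b: int):
--         ra, rb = find(a), find(b)
--         if ra != rb: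
--             parent[ra] = rb
--
--     for i in range(n):
--         for j in range(i + 1, n):
--             if action_files[i][1] & action_files[j][1]:
--                 union(i, j)
--
--     groups_map: dict[int, list[int]] = {}
--     for i in range(n):
--         root = find(i)
--         groups_map.setdefault(root, []).append(i)
--
--     return [[action_files[i] for i in idxs] for idxs in groups_map.values()]
-- ===== SOURCE B (Python) =====
-- def _group_by_file_overlap(
--     action_files: list[tuple[dict, set[str]]],
-- ) -> list[list[tuple[dict, set[str]]]]:
--     """Group actions whose file sets overlap, via an inverted index (file ->
--     first action seen with it) + union-find, instead of all-pairs intersection."""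
--     n = len(action_files)
--     if n == 0:
--         return []
--
--     parent = list(range(n))
--
--     def find(x: int) -> int:
--         while parent[x] != x:
--             parent[x] = parent[parent[x]]
--             x = parent[x]
--         return x
--
--     def union(a: int, b: int):
--         ra, rb = find(a), find(b)
--         if ra != rb:
--             parent[ra] = rb
--
--     first_with: dict[str, int] = {}
--     for i, (_, files) in enumerate(action_files):
--         for f in files:
--             if f in first_with:
--                 union(first_with[f], i)
--             else:
--                 first_with[f] = i
--
--     comp: dict[int, int] = {}
--     groups: list[list[tuple[dict, set[str]]]] = []
--     for i in range(n):
--         r = find(i)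
--         if r in comp:
--             groups[comp[r]].append(action_files[i])
--         else:
--             comp[r] = len(groups)
--             groups.append([action_files[i]])
--     return groups
-- ===== Notes on version B (the rewrite author's own statement) =====
-- stated objective: faster
-- what changed: Edge generation by all-pairs set intersection is replaced by an inverted index (file -> first action seen with it) that unions each later holder of a file with that first holder, and the root-keyed dict of index lists is replaced by a root->position dict with groups built directly in first-seen order.
import Mathlib
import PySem

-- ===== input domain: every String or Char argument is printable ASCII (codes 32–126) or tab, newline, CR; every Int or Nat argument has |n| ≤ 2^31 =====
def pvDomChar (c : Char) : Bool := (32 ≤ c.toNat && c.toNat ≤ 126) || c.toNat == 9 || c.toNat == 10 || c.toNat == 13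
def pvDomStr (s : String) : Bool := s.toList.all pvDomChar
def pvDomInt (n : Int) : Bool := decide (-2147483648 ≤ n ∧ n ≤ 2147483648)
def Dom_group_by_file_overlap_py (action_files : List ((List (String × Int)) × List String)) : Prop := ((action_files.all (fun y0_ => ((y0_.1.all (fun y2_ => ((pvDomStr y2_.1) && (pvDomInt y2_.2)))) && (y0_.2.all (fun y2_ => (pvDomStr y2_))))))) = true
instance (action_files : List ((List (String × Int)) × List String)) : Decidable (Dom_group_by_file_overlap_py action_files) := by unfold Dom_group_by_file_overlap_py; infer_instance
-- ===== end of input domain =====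

-- B replaces A's all-pairs set-intersection edge generation by an inverted index
-- (file -> first action seen with it), unioning each later holder with that first
-- holder; same union-find core, same groups. Objective: faster edge generation.

-- ===== PORT A =====
-- shared union-find primitives (transliteration of the Python find/union closures,
-- identical in Source A and Source B; find uses fuel = len(parent), proven sufficient below)
def pvPar (p : List Nat) (x : Nat) : Nat := p.getD x 0

def pvFind : Nat → List Nat → Nat → List Nat × Nat
  | 0, p, x => (p, x)
  | fuel+1, p, x =>
    if pvPar p x = x then (p, x)
    else pvFind fuel (p.set x (pvPar p (pvPar p x))) (pvPar p (pvPar p x))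

def pvUnion (p : List Nat) (a b : Nat) : List Nat :=
  let fa := pvFind p.length p a
  let fb := pvFind fa.1.length fa.1 b
  if fa.2 ≠ fb.2 then fb.1.set fa.2 fb.2 else fb.1

def group_by_file_overlap_py (action_files : List ((List (String × Int)) × List String)) :
    List (List ((List (String × Int)) × List String)) :=
  let n := action_files.length
  if n = 0 then []
  else
    -- parent = list(range(n)); all-pairs overlap test, union(i, j)
    let p1 := (List.range n).foldl (fun p i =>
        (List.range' (i+1) (n - (i+1))).foldl (fun p j =>
          if PySem.Set.inter ((action_files.getD i ([],[])).2) ((action_files.getD j ([],[])).2) ≠ []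
          then pvUnion p i j else p) p)
      (List.range n)
    -- groups_map: dict root -> indices (setdefault+append), then map back to items
    let st := (List.range n).foldl (fun (s : List Nat × PySem.Dict Nat (List Nat)) i =>
        let fr := pvFind s.1.length s.1 i
        (fr.1, s.2.modify fr.2 [] (fun l => l ++ [i]))) (p1, PySem.Dict.empty)
    st.2.values.map (fun idxs => idxs.map (fun i => action_files.getD i ([],[])))

-- ===== PORT B =====
def group_by_file_overlap_py_alt (action_files : List ((List (String × Int)) × List String)) :
    List (List ((List (String × Int)) × List String)) :=
  let n := action_files.length
  if n = 0 then []
  else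
    -- inverted index: first action seen with each file; union with it on re-occurrence
    let st1 := action_files.foldl (fun (s : Nat × List Nat × PySem.Dict String Nat) a =>
        (s.1 + 1, a.2.foldl (fun (t : List Nat × PySem.Dict String Nat) f =>
          match t.2.get? f with
          | some j => (pvUnion t.1 j s.1, t.2)
          | none => (t.1, t.2.insert f s.1)) s.2)) (0, List.range n, PySem.Dict.empty)
    -- comp: root -> group position; groups built in order of first appearance
    let st2 := (List.range n).foldl
      (fun (s : List Nat × PySem.Dict Nat Nat × List (List ((List (String × Int)) × List String))) i =>
        let fr := pvFind s.1.length s.1 i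
        match s.2.1.get? fr.2 with
        | some k => (fr.1, s.2.1, s.2.2.set k (s.2.2.getD k [] ++ [action_files.getD i ([],[])]))
        | none => (fr.1, s.2.1.insert fr.2 s.2.2.length, s.2.2 ++ [[action_files.getD i ([],[])]]))
      (st1.2.1, PySem.Dict.empty, [])
    st2.2.2

-- ===== PRECONDITION & SPEC =====
def Spec_group_by_file_overlap_py (action_files : List ((List (String × Int)) × List String)) (out : List (List ((List (String × Int)) × List String))) : Prop := out = group_by_file_overlap_py_alt action_files
instance (action_files : List ((List (String × Int)) × List String)) (out : List (List ((List (String × Int)) × List String))) : Decidable (Spec_group_by_file_overlap_py action_files out) := by unfold Spec_group_by_file_overlap_py; infer_instance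

-- ===== CLAIM (what is proved, stated in full; the proofs are below) =====
def Claim_equal_group_by_file_overlap_py : Prop := ∀ (action_files : List ((List (String × Int)) × List String)), Dom_group_by_file_overlap_py action_files → Spec_group_by_file_overlap_py action_files (group_by_file_overlap_py action_files)

-- ===== LEMMAS AND PROOFS =====
def pvIt (p : List Nat) (k x : Nat) : Nat := (pvPar p)^[k] x

def pvEvAt (p : List Nat) (x : Nat) : Prop := ∃ k, pvPar p (pvIt p k x) = pvIt p k x

noncomputable def pvDep (p : List Nat) (x : Nat) : Nat :=
  @dite _ (pvEvAt p x) (Classical.propDecidable _) (fun h => Nat.find h) (fun _ => 0)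

noncomputable def pvRoot (p : List Nat) (x : Nat) : Nat := pvIt p (pvDep p x) x

theorem pvIt_zero (p : List Nat) (x : Nat) : pvIt p 0 x = x := rfl
theorem pvIt_succ (p : List Nat) (k x : Nat) : pvIt p (k+1) x = pvPar p (pvIt p k x) := by
  simp [pvIt, Function.iterate_succ_apply']
theorem pvIt_add (p : List Nat) (m k x : Nat) : pvIt p (m + k) x = pvIt p m (pvIt p k x) := by
  simp [pvIt, Function.iterate_add_apply]

theorem pvDep_fix (p : List Nat) (x : Nat) (h : pvEvAt p x) :
    pvPar p (pvIt p (pvDep p x) x) = pvIt p (pvDep p x) x := by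
  rw [pvDep]; rw [dif_pos h]; exact Nat.find_spec h

theorem pvDep_min (p : List Nat) (x : Nat) (h : pvEvAt p x) {k : Nat} (hk : k < pvDep p x) :
    pvPar p (pvIt p k x) ≠ pvIt p k x := by
  rw [pvDep] at hk; rw [dif_pos h] at hk; exact Nat.find_min h hk

theorem pvRoot_fix (p : List Nat) (x : Nat) (h : pvEvAt p x) :
    pvPar p (pvRoot p x) = pvRoot p x := pvDep_fix p x h

theorem pvIt_of_ge (p : List Nat) (x : Nat) (h : pvEvAt p x) {m : Nat} (hm : pvDep p x ≤ m) :
    pvIt p m x = pvRoot p x := by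
  obtain ⟨j, rfl⟩ := Nat.exists_eq_add_of_le hm
  induction j with
  | zero => rfl
  | succ j ih =>
    have heq : pvDep p x + (j+1) = (pvDep p x + j) + 1 := by omega
    rw [heq, pvIt_succ, ih (Nat.le_add_right _ _), pvRoot_fix p x h]

theorem pvIt_fixed (p : List Nat) {z : Nat} (hz : pvPar p z = z) (m : Nat) : pvIt p m z = z := by
  induction m with
  | zero => rfl
  | succ m ih => rw [pvIt_succ, ih, hz]

theorem pvRoot_eq_self_of_fix (p : List Nat) {x : Nat} (hx : pvPar p x = x) : pvRoot p x = x :=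
  pvIt_fixed p hx _

theorem root_eq_of_it_fixed (p : List Nat) {z m w : Nat} (h : pvEvAt p z)
    (hm : pvIt p m z = w) (hw : pvPar p w = w) : pvRoot p z = w := by
  have h1 : pvIt p ((max m (pvDep p z) - m) + m) z = w := by
    rw [pvIt_add, hm, pvIt_fixed p hw]
  have h2 : pvIt p ((max m (pvDep p z) - m) + m) z = pvRoot p z := by
    apply pvIt_of_ge p z h; omega
  rw [← h1, h2]

theorem pvEvAt_it (p : List Nat) {x : Nat} (h : pvEvAt p x) (k : Nat) : pvEvAt p (pvIt p k x) := by
  refine ⟨pvDep p x, ?_⟩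
  rw [← pvIt_add]
  have h1 : pvIt p (pvDep p x + k) x = pvRoot p x := pvIt_of_ge p x h (by omega)
  rw [h1]; exact pvRoot_fix p x h

theorem pvRoot_it (p : List Nat) {x : Nat} (h : pvEvAt p x) (k : Nat) :
    pvRoot p (pvIt p k x) = pvRoot p x := by
  refine root_eq_of_it_fixed p (pvEvAt_it p h k) (m := pvDep p x) ?_ (pvRoot_fix p x h)
  rw [← pvIt_add]
  exact pvIt_of_ge p x h (by omega)

def pvRng (p : List Nat) : Prop := ∀ x, x < p.length → pvPar p x < p.length

theorem pvIt_lt (p : List Nat) (hr : pvRng p) {x : Nat} (hx : x < p.length) (k : Nat) :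
    pvIt p k x < p.length := by
  induction k with
  | zero => exact hx
  | succ k ih => rw [pvIt_succ]; exact hr _ ih

theorem pvRoot_lt (p : List Nat) (hr : pvRng p) {x : Nat} (hx : x < p.length) :
    pvRoot p x < p.length := pvIt_lt p hr hx _

theorem pvOrbit_period (p : List Nat) {x i d : Nat} (hd : pvIt p (i + d) x = pvIt p i x) (m : Nat) :
    pvIt p (i + m * d) x = pvIt p i x := by
  induction m with
  | zero => simp
  | succ m ih =>
    have e1 : i + (m + 1) * d = m * d + (i + d) := by ring
    calc pvIt p (i + (m + 1) * d) x = pvIt p (m * d) (pvIt p (i + d) x) := by rw [e1, pvIt_add]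
    _ = pvIt p (m * d) (pvIt p i x) := by rw [hd]
    _ = pvIt p (m * d + i) x := by rw [pvIt_add]
    _ = pvIt p i x := by rw [Nat.add_comm]; exact ih

theorem pvOrbit_inj (p : List Nat) {x : Nat} (h : pvEvAt p x) {i j : Nat}
    (hij : i < j) (hj : j ≤ pvDep p x) : pvIt p i x ≠ pvIt p j x := by
  intro heq
  have hd : pvIt p (i + (j - i)) x = pvIt p i x := by
    rw [Nat.add_sub_cancel' (le_of_lt hij)]; exact heq.symm
  have hper := pvOrbit_period p hd (pvDep p x)
  have hge : i + pvDep p x * (j - i) ≥ pvDep p x := by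
    have : j - i ≥ 1 := by omega
    nlinarith
  have hroot : pvIt p (i + pvDep p x * (j - i)) x = pvRoot p x := pvIt_of_ge p x h hge
  have hfix : pvPar p (pvIt p i x) = pvIt p i x := by
    rw [← hper, hroot]; exact pvRoot_fix p x h
  exact pvDep_min p x h (lt_of_lt_of_le hij hj) hfix

theorem pvDep_le_of_fix (p : List Nat) {x k : Nat} (h : pvEvAt p x)
    (hk : pvPar p (pvIt p k x) = pvIt p k x) : pvDep p x ≤ k := by
  rw [pvDep]; rw [dif_pos h]; exact Nat.find_le hk

theorem pvDep_lt_len (p : List Nat) (hr : pvRng p) {x : Nat} (h : pvEvAt p x)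
    (hx : x < p.length) : pvDep p x < p.length := by
  by_contra hcon
  push_neg at hcon
  -- the orbit prefix of length pvDep+1 is injective into range p.length
  have hinj : ∀ i j, i < j → j ≤ pvDep p x → pvIt p i x ≠ pvIt p j x := fun i j hij hj => pvOrbit_inj p h hij hj
  -- build nodup list of distinct values < p.length with length dep+1 > p.length : contradiction
  have hnodup : ((List.range (pvDep p x + 1)).map (fun k => pvIt p k x)).Nodup := by
    refine List.Nodup.map_on ?_ (List.nodup_range)
    intro a ha b hb hab
    simp only [List.mem_range] at ha hb
    by_contra hne
    rcases Nat.lt_or_ge a b with hlt | hge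
    · exact hinj a b hlt (by omega) hab
    · have : b < a := by omega
      exact hinj b a this (by omega) hab.symm
  have hsub : ((List.range (pvDep p x + 1)).map (fun k => pvIt p k x)).toFinset ⊆ Finset.range p.length := by
    intro v hv
    simp only [List.mem_toFinset, List.mem_map, List.mem_range] at hv
    obtain ⟨k, _, rfl⟩ := hv
    simpa using pvIt_lt p hr hx k
  have hcard := Finset.card_le_card hsub
  rw [List.toFinset_card_of_nodup hnodup] at hcard
  simp at hcard
  omega

theorem pvPar_set (p : List Nat) {x : Nat} (hx : x < p.length) (v z : Nat) :
    pvPar (p.set x v) z = if z = x then v else pvPar p z := by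
  by_cases hz : z = x
  · subst hz; simp [pvPar, List.getD, hx]
  · rw [if_neg hz]
    simp only [pvPar, List.getD]
    rw [List.getElem?_set_ne (by omega : x ≠ z)]

-- no 2-cycles under eventual fixedness
theorem pvNoTwoCycle (p : List Nat) {x : Nat} (h : pvEvAt p x) (hne : pvPar p x ≠ x) :
    pvPar p (pvPar p x) ≠ x := by
  intro h2
  -- orbit alternates x, pvPar p x; no iterate is fixed
  have halt : ∀ k, pvIt p k x = x ∨ pvIt p k x = pvPar p x := by
    intro k
    induction k with
    | zero => left; rfl
    | succ k ih =>
      rcases ih with h1 | h1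
      · right; rw [pvIt_succ, h1]
      · left; rw [pvIt_succ, h1, h2]
  obtain ⟨k, hk⟩ := h
  rcases halt k with h1 | h1 <;> rw [h1] at hk
  · exact hne hk
  · rw [h2] at hk; exact hne hk.symm

-- general transfer: if q only redirects x to a further iterate of p, orbits fast-forward
theorem pvIt_transfer (p q : List Nat) (hstep : ∀ z, ∃ m, 1 ≤ m ∧ pvPar q z = pvIt p m z) :
    ∀ k z, ∃ m, k ≤ m ∧ pvIt q k z = pvIt p m z := by
  intro k
  induction k with
  | zero => intro z; exact ⟨0, le_refl _, rfl⟩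
  | succ k ih =>
    intro z
    obtain ⟨m, hkm, hm⟩ := ih z
    obtain ⟨c, hc1, hc⟩ := hstep (pvIt p m z)
    refine ⟨c + m, by omega, ?_⟩
    rw [pvIt_succ, hm, hc, ← pvIt_add]

theorem pvDep_pos (p : List Nat) {x : Nat} (h : pvEvAt p x) (hne : pvPar p x ≠ x) :
    1 ≤ pvDep p x := by
  by_contra hc
  have h0 : pvDep p x = 0 := by omega
  have := pvDep_fix p x h
  rw [h0] at this
  exact hne this

theorem pvHalve (p : List Nat) {x : Nat} (hr : pvRng p) (hev : ∀ z, pvEvAt p z)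
    (hx : x < p.length) (hne : pvPar p x ≠ x) :
    (p.set x (pvPar p (pvPar p x))).length = p.length ∧
    pvRng (p.set x (pvPar p (pvPar p x))) ∧
    (∀ z, pvEvAt (p.set x (pvPar p (pvPar p x))) z) ∧
    (∀ z, pvRoot (p.set x (pvPar p (pvPar p x))) z = pvRoot p z) ∧
    pvDep (p.set x (pvPar p (pvPar p x))) (pvPar p (pvPar p x)) < pvDep p x := by
  set q := p.set x (pvPar p (pvPar p x)) with hq
  have hlen : q.length = p.length := by simp [hq]
  have hA : ∀ z, pvPar q z = if z = x then pvPar p (pvPar p x) else pvPar p z :=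
    fun z => pvPar_set p hx _ z
  have hfix_iff : ∀ z, (pvPar q z = z ↔ pvPar p z = z) := by
    intro z
    by_cases hz : z = x
    · subst hz
      rw [hA]
      simp only [if_pos rfl]
      constructor
      · intro hcon; exact absurd hcon (pvNoTwoCycle p (hev z) hne)
      · intro hcon; exact absurd hcon hne
    · rw [hA, if_neg hz]
  have hstep : ∀ z, ∃ m, 1 ≤ m ∧ pvPar q z = pvIt p m z := by
    intro z
    by_cases hz : z = x
    · subst hz
      exact ⟨2, by omega, by rw [hA, if_pos rfl]; rfl⟩
    · exact ⟨1, le_refl _, by rw [hA, if_neg hz]; rfl⟩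
  have htr := pvIt_transfer p q hstep
  have hevq : ∀ z, pvEvAt q z := by
    intro z
    obtain ⟨m, hm, heq⟩ := htr (pvDep p z) z
    refine ⟨pvDep p z, ?_⟩
    rw [heq, pvIt_of_ge p z (hev z) hm, hfix_iff]
    exact pvRoot_fix p z (hev z)
  have hroot : ∀ z, pvRoot q z = pvRoot p z := by
    intro z
    obtain ⟨m, hm, heq⟩ := htr (pvDep q z) z
    have hfixq : pvPar q (pvRoot q z) = pvRoot q z := pvRoot_fix q z (hevq z)
    have hfixp : pvPar p (pvRoot q z) = pvRoot q z := (hfix_iff _).mp hfixq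
    exact (root_eq_of_it_fixed p (hev z) (m := m) (w := pvRoot q z) heq.symm hfixp).symm
  refine ⟨hlen, ?_, hevq, hroot, ?_⟩
  · intro z hz
    rw [hlen] at hz
    rw [hA]
    by_cases hzx : z = x
    · rw [if_pos hzx, hlen]; exact hr _ (hr _ hx)
    · rw [if_neg hzx, hlen]; exact hr _ hz
  · have h1 : 1 ≤ pvDep p x := pvDep_pos p (hev x) hne
    have hdy : pvDep p (pvPar p (pvPar p x)) ≤ pvDep p x - 1 := by
      apply pvDep_le_of_fix p (hev _)
      have he : pvIt p (pvDep p x - 1) (pvPar p (pvPar p x)) = pvIt p (pvDep p x + 1) x := by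
        rw [show pvPar p (pvPar p x) = pvIt p 2 x from rfl, ← pvIt_add]
        congr 1
        omega
      rw [he, pvIt_of_ge p x (hev x) (by omega)]
      exact pvRoot_fix p x (hev x)
    have hdq : pvDep q (pvPar p (pvPar p x)) ≤ pvDep p (pvPar p (pvPar p x)) := by
      apply pvDep_le_of_fix q (hevq _)
      obtain ⟨m, hm, heq⟩ := htr (pvDep p (pvPar p (pvPar p x))) (pvPar p (pvPar p x))
      rw [heq, pvIt_of_ge p _ (hev _) hm, hfix_iff]
      exact pvRoot_fix p _ (hev _)
    omega



theorem pvFind_spec (fuel : Nat) : ∀ (p : List Nat) (x : Nat), pvRng p → (∀ z, pvEvAt p z) →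
    x < p.length → pvDep p x < fuel →
    (pvFind fuel p x).2 = pvRoot p x ∧ (pvFind fuel p x).1.length = p.length ∧
    pvRng (pvFind fuel p x).1 ∧ (∀ z, pvEvAt (pvFind fuel p x).1 z) ∧
    (∀ z, pvRoot (pvFind fuel p x).1 z = pvRoot p z) := by
  induction fuel with
  | zero => intro p x _ _ _ hd; omega
  | succ fuel ih =>
    intro p x hr hev hx hd
    by_cases hfix : pvPar p x = x
    · rw [show pvFind (fuel+1) p x = (p, x) from by simp [pvFind, hfix]]
      exact ⟨(pvRoot_eq_self_of_fix p hfix).symm, rfl, hr, hev, fun z => rfl⟩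
    · rw [show pvFind (fuel+1) p x = pvFind fuel (p.set x (pvPar p (pvPar p x))) (pvPar p (pvPar p x)) from by simp [pvFind, hfix]]
      obtain ⟨hlen, hrq, hevq, hroot, hdep⟩ := pvHalve p hr hev hx hfix
      have hx' : pvPar p (pvPar p x) < (p.set x (pvPar p (pvPar p x))).length := by
        rw [hlen]; exact hr _ (hr _ hx)
      obtain ⟨h1, h2, h3, h4, h5⟩ := ih _ _ hrq hevq hx' (by omega)
      refine ⟨?_, by rw [h2, hlen], h3, h4, fun z => by rw [h5 z, hroot z]⟩
      rw [h1, hroot]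
      have : pvPar p (pvPar p x) = pvIt p 2 x := rfl
      rw [this, pvRoot_it p (hev x) 2]

theorem pvSetRoot (p : List Nat) {ra rb : Nat} (hr : pvRng p) (hev : ∀ z, pvEvAt p z)
    (hra : ra < p.length) (hrb : rb < p.length) (hfa : pvPar p ra = ra) (hfb : pvPar p rb = rb)
    (hne : ra ≠ rb) :
    (p.set ra rb).length = p.length ∧ pvRng (p.set ra rb) ∧
    (∀ z, pvEvAt (p.set ra rb) z) ∧
    (∀ z, pvRoot (p.set ra rb) z = if pvRoot p z = ra then rb else pvRoot p z) := by
  set q := p.set ra rb with hq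
  have hlen : q.length = p.length := by simp [hq]
  have hA : ∀ z, pvPar q z = if z = ra then rb else pvPar p z := fun z => pvPar_set p hra _ z
  have hnotra : ∀ z k, pvRoot p z ≠ ra → pvIt p k z ≠ ra := by
    intro z k hz heq
    apply hz
    have := pvRoot_it p (hev z) k
    rw [heq] at this
    rw [← this, pvRoot_eq_self_of_fix p hfa]
  have hsame : ∀ z, pvRoot p z ≠ ra → ∀ k, pvIt q k z = pvIt p k z := by
    intro z hz k
    induction k with
    | zero => rfl
    | succ k ihk =>
      rw [pvIt_succ, pvIt_succ, ihk, hA, if_neg (hnotra z k hz)]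
  have hcase1 : ∀ z, pvRoot p z ≠ ra → pvEvAt q z ∧ pvRoot q z = pvRoot p z := by
    intro z hz
    have hev1 : pvEvAt q z := by
      refine ⟨pvDep p z, ?_⟩
      rw [hsame z hz, pvIt_of_ge p z (hev z) (le_refl _), hA,
        if_neg (by rw [← pvIt_of_ge p z (hev z) (le_refl _)]; exact hnotra z _ hz)]
      exact pvRoot_fix p z (hev z)
    refine ⟨hev1, ?_⟩
    apply root_eq_of_it_fixed q hev1 (m := pvDep p z)
    · rw [hsame z hz]; exact pvIt_of_ge p z (hev z) (le_refl _)
    · rw [hA, if_neg (by rw [← pvIt_of_ge p z (hev z) (le_refl _)]; exact hnotra z _ hz)]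
      exact pvRoot_fix p z (hev z)
  have hcase2 : ∀ z, pvRoot p z = ra → pvEvAt q z ∧ pvRoot q z = rb := by
    intro z hz
    -- before depth: orbit elements are not ra
    have hpre : ∀ k, k < pvDep p z → pvIt p k z ≠ ra := by
      intro k hk heq
      have hfixk : pvPar p (pvIt p k z) = pvIt p k z := by rw [heq]; exact hfa
      exact absurd (pvDep_le_of_fix p (hev z) hfixk) (by omega)
    have hsame2 : ∀ k, k ≤ pvDep p z → pvIt q k z = pvIt p k z := by
      intro k hk
      induction k with
      | zero => rfl
      | succ k ihk =>
        rw [pvIt_succ, pvIt_succ, ihk (by omega), hA, if_neg (hpre k (by omega))]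
    have hhit : pvIt q (pvDep p z) z = ra := by
      rw [hsame2 _ (le_refl _), pvIt_of_ge p z (hev z) (le_refl _), hz]
    have hnext : pvIt q (pvDep p z + 1) z = rb := by
      rw [pvIt_succ, hhit, hA, if_pos rfl]
    have hfixrb : pvPar q rb = rb := by
      rw [hA, if_neg (Ne.symm hne), hfb]
    have hev2 : pvEvAt q z := ⟨pvDep p z + 1, by rw [hnext, hfixrb]⟩
    exact ⟨hev2, root_eq_of_it_fixed q hev2 hnext hfixrb⟩
  refine ⟨hlen, ?_, ?_, ?_⟩
  · intro z hz
    rw [hlen] at hz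
    rw [hA]
    by_cases hzr : z = ra
    · rw [if_pos hzr, hlen]; exact hrb
    · rw [if_neg hzr, hlen]; exact hr _ hz
  · intro z
    by_cases hz : pvRoot p z = ra
    · exact (hcase2 z hz).1
    · exact (hcase1 z hz).1
  · intro z
    by_cases hz : pvRoot p z = ra
    · rw [if_pos hz]; exact (hcase2 z hz).2
    · rw [if_neg hz]; exact (hcase1 z hz).2

theorem pvRoot_root (p : List Nat) {x : Nat} (h : pvEvAt p x) :
    pvRoot p (pvRoot p x) = pvRoot p x := pvRoot_it p h _

theorem pvFix_of_root_eq_self (p : List Nat) {w : Nat} (h : pvEvAt p w)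
    (hw : pvRoot p w = w) : pvPar p w = w := by
  rcases Nat.eq_zero_or_pos (pvDep p w) with h0 | h0
  · have := pvDep_fix p w h
    rw [h0] at this
    exact this
  · exfalso
    exact pvOrbit_inj p h h0 (le_refl _) hw.symm

theorem pvUnion_spec (p : List Nat) (a b : Nat) (hr : pvRng p) (hev : ∀ z, pvEvAt p z)
    (ha : a < p.length) (hb : b < p.length) :
    (pvUnion p a b).length = p.length ∧ pvRng (pvUnion p a b) ∧
    (∀ z, pvEvAt (pvUnion p a b) z) ∧
    (∀ z, pvRoot (pvUnion p a b) z = if pvRoot p z = pvRoot p a then pvRoot p b else pvRoot p z) := by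
  obtain ⟨ha1, ha2, ha3, ha4, ha5⟩ :=
    pvFind_spec p.length p a hr hev ha (pvDep_lt_len p hr (hev a) ha)
  set p1 := (pvFind p.length p a).1 with hp1
  set ra := (pvFind p.length p a).2 with hra
  have hb1 : b < p1.length := by rw [ha2]; exact hb
  obtain ⟨hb2, hb3, hb4, hb5, hb6⟩ :=
    pvFind_spec p1.length p1 b ha3 ha4 hb1 (pvDep_lt_len p1 ha3 (ha4 b) hb1)
  set p2 := (pvFind p1.length p1 b).1 with hp2
  set rb := (pvFind p1.length p1 b).2 with hrb
  have hrav : ra = pvRoot p a := ha1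
  have hrbv : rb = pvRoot p b := by rw [hb2, ha5]
  have hroots2 : ∀ z, pvRoot p2 z = pvRoot p z := fun z => by rw [hb6 z, ha5 z]
  have hlen2 : p2.length = p.length := by rw [hb3, ha2]
  have hU : pvUnion p a b = if ra ≠ rb then p2.set ra rb else p2 := rfl
  by_cases hne : ra ≠ rb
  · rw [hU, if_pos hne]
    have hral : ra < p2.length := by
      rw [hlen2, hrav]; exact pvRoot_lt p hr ha
    have hrbl : rb < p2.length := by
      rw [hlen2, hrbv]; exact pvRoot_lt p hr hb
    have hfixra : pvPar p2 ra = ra := by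
      apply pvFix_of_root_eq_self p2 (hb5 ra)
      rw [hroots2, hrav]
      exact pvRoot_root p (hev a)
    have hfixrb : pvPar p2 rb = rb := by
      apply pvFix_of_root_eq_self p2 (hb5 rb)
      rw [hroots2, hrbv]
      exact pvRoot_root p (hev b)
    obtain ⟨hs1, hs2, hs3, hs4⟩ := pvSetRoot p2 hb4 hb5 hral hrbl hfixra hfixrb hne
    refine ⟨by rw [hs1, hlen2], hs2, hs3, fun z => ?_⟩
    rw [hs4 z, hroots2 z, hrav, hrbv]
  · rw [hU, if_neg hne]
    push_neg at hne
    refine ⟨hlen2, hb4, hb5, fun z => ?_⟩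
    rw [hroots2 z]
    by_cases hz : pvRoot p z = pvRoot p a
    · rw [if_pos hz, hz, ← hrav, hne, hrbv]
    · rw [if_neg hz]

def pvKer (p : List Nat) (i j : Nat) : Prop := pvRoot p i = pvRoot p j

theorem pvKer_equiv (p : List Nat) : Equivalence (pvKer p) :=
  ⟨fun _ => rfl, Eq.symm, Eq.trans⟩

theorem eqvGen_pair {E : Nat → Nat → Prop} (hE : Equivalence E) (a b : Nat) (i j : Nat) :
    Relation.EqvGen (fun u v => E u v ∨ (u = a ∧ v = b)) i j ↔
      E i j ∨ (E i a ∧ E b j) ∨ (E i b ∧ E a j) := by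
  constructor
  · intro h
    induction h with
    | rel u v huv =>
      rcases huv with h1 | ⟨rfl, rfl⟩
      · exact Or.inl h1
      · exact Or.inr (Or.inl ⟨hE.refl _, hE.refl _⟩)
    | refl u => exact Or.inl (hE.refl u)
    | symm u v _ ih =>
      rcases ih with h1 | ⟨h1, h2⟩ | ⟨h1, h2⟩
      · exact Or.inl (hE.symm h1)
      · exact Or.inr (Or.inr ⟨hE.symm h2, hE.symm h1⟩)
      · exact Or.inr (Or.inl ⟨hE.symm h2, hE.symm h1⟩)
    | trans u v w _ _ ih1 ih2 =>
      rcases ih1 with h1 | ⟨h1, h2⟩ | ⟨h1, h2⟩ <;>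
        rcases ih2 with h3 | ⟨h3, h4⟩ | ⟨h3, h4⟩
      · exact Or.inl (hE.trans h1 h3)
      · exact Or.inr (Or.inl ⟨hE.trans h1 h3, h4⟩)
      · exact Or.inr (Or.inr ⟨hE.trans h1 h3, h4⟩)
      · exact Or.inr (Or.inl ⟨h1, hE.trans h2 h3⟩)
      · exact Or.inl (hE.trans h1 (hE.trans (hE.symm (hE.trans h2 h3)) h4))
      · exact Or.inl (hE.trans h1 h4)
      · exact Or.inr (Or.inr ⟨h1, hE.trans h2 h3⟩)
      · exact Or.inl (hE.trans h1 h4)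
      · exact Or.inl (hE.trans (hE.trans h1 (hE.trans (hE.symm h3) (hE.symm h2))) h4)
  · intro h
    have hbase : ∀ u v, E u v → Relation.EqvGen (fun u v => E u v ∨ (u = a ∧ v = b)) u v :=
      fun u v huv => Relation.EqvGen.rel u v (Or.inl huv)
    have hab : Relation.EqvGen (fun u v => E u v ∨ (u = a ∧ v = b)) a b :=
      Relation.EqvGen.rel a b (Or.inr ⟨rfl, rfl⟩)
    rcases h with h1 | ⟨h1, h2⟩ | ⟨h1, h2⟩
    · exact hbase _ _ h1
    · exact Relation.EqvGen.trans _ _ _ (hbase _ _ h1)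
        (Relation.EqvGen.trans _ _ _ hab (hbase _ _ h2))
    · exact Relation.EqvGen.trans _ _ _ (hbase _ _ h1)
        (Relation.EqvGen.trans _ _ _ (Relation.EqvGen.symm _ _ hab) (hbase _ _ h2))

theorem eqvGen_congr {R R' : Nat → Nat → Prop} (h : ∀ u v, R u v ↔ R' u v) (i j : Nat) :
    Relation.EqvGen R i j ↔ Relation.EqvGen R' i j :=
  ⟨Relation.EqvGen.mono (fun u v huv => (h u v).mp huv),
   Relation.EqvGen.mono (fun u v huv => (h u v).mpr huv)⟩

theorem eqvGen_collapse {R S : Nat → Nat → Prop} (i j : Nat) :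
    Relation.EqvGen (fun u v => Relation.EqvGen R u v ∨ S u v) i j ↔
      Relation.EqvGen (fun u v => R u v ∨ S u v) i j := by
  constructor
  · intro h
    induction h with
    | rel u v huv =>
      rcases huv with h1 | h1
      · exact Relation.EqvGen.mono (fun u v huv => Or.inl huv) h1
      · exact Relation.EqvGen.rel u v (Or.inr h1)
    | refl u => exact Relation.EqvGen.refl u
    | symm u v _ ih => exact Relation.EqvGen.symm _ _ ih
    | trans u v w _ _ ih1 ih2 => exact Relation.EqvGen.trans _ _ _ ih1 ih2
  · exact Relation.EqvGen.mono (fun u v huv =>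
      huv.elim (fun h1 => Or.inl (Relation.EqvGen.rel u v h1)) Or.inr)

theorem eqvGen_of_equivalence {E : Nat → Nat → Prop} (hE : Equivalence E) (i j : Nat) :
    Relation.EqvGen E i j ↔ E i j := by
  constructor
  · intro h
    induction h with
    | rel u v huv => exact huv
    | refl u => exact hE.refl u
    | symm u v _ ih => exact hE.symm ih
    | trans u v w _ _ ih1 ih2 => exact hE.trans ih1 ih2
  · exact Relation.EqvGen.rel i j

theorem pvUnion_ker (p : List Nat) (a b : Nat) (hr : pvRng p) (hev : ∀ z, pvEvAt p z)
    (ha : a < p.length) (hb : b < p.length) (i j : Nat) :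
    pvKer (pvUnion p a b) i j ↔
      Relation.EqvGen (fun u v => pvKer p u v ∨ (u = a ∧ v = b)) i j := by
  have hform := (pvUnion_spec p a b hr hev ha hb).2.2.2
  rw [eqvGen_pair (pvKer_equiv p)]
  unfold pvKer at *
  rw [hform i, hform j]
  split_ifs with h1 h2 h2 <;> omega

def pvUnionList (p : List Nat) (es : List (Nat × Nat)) : List Nat :=
  es.foldl (fun p e => pvUnion p e.1 e.2) p

theorem pvUnionList_spec : ∀ (es : List (Nat × Nat)) (p : List Nat), pvRng p →
    (∀ z, pvEvAt p z) → (∀ e ∈ es, e.1 < p.length ∧ e.2 < p.length) →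
    (pvUnionList p es).length = p.length ∧ pvRng (pvUnionList p es) ∧
    (∀ z, pvEvAt (pvUnionList p es) z) ∧
    (∀ i j, pvKer (pvUnionList p es) i j ↔
      Relation.EqvGen (fun u v => pvKer p u v ∨ (u, v) ∈ es) i j) := by
  intro es
  induction es with
  | nil =>
    intro p hr hev _
    refine ⟨rfl, hr, hev, fun i j => ?_⟩
    rw [eqvGen_congr (R' := pvKer p) (fun u v => by simp), eqvGen_of_equivalence (pvKer_equiv p)]
    exact Iff.rfl
  | cons e es ih =>
    intro p hr hev hbd
    have he := hbd e (by simp)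
    obtain ⟨hl1, hl2, hl3, hl4⟩ := pvUnion_spec p e.1 e.2 hr hev he.1 he.2
    have hbd' : ∀ e' ∈ es, e'.1 < (pvUnion p e.1 e.2).length ∧ e'.2 < (pvUnion p e.1 e.2).length := by
      intro e' he'
      rw [hl1]; exact hbd e' (by simp [he'])
    have hstep : pvUnionList p (e :: es) = pvUnionList (pvUnion p e.1 e.2) es := rfl
    obtain ⟨hq1, hq2, hq3, hq4⟩ := ih (pvUnion p e.1 e.2) hl2 hl3 hbd'
    refine ⟨by rw [hstep, hq1, hl1], by rw [hstep]; exact hq2, by rw [hstep]; exact hq3, fun i j => ?_⟩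
    rw [hstep, hq4 i j]
    have h1 : ∀ u v, (pvKer (pvUnion p e.1 e.2) u v ∨ (u, v) ∈ es) ↔
        ((Relation.EqvGen (fun u' v' => pvKer p u' v' ∨ (u' = e.1 ∧ v' = e.2)) u v) ∨ (u, v) ∈ es) :=
      fun u v => or_congr_left (pvUnion_ker p e.1 e.2 hr hev he.1 he.2 u v)
    rw [eqvGen_congr h1, eqvGen_collapse]
    apply eqvGen_congr
    intro u v
    constructor
    · rintro ((h | ⟨rfl, rfl⟩) | h)
      · exact Or.inl h
      · exact Or.inr (by simp)
      · exact Or.inr (by simp [h])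
    · rintro (h | h)
      · exact Or.inl (Or.inl h)
      · rcases List.mem_cons.mp h with h2 | h2
        · left; right
          constructor
          · rw [show e.1 = (e.1, e.2).1 from rfl, ← h2]
          · rw [show e.2 = (e.1, e.2).2 from rfl, ← h2]
        · exact Or.inr h2

theorem pvInit_rng (n : Nat) : pvRng (List.range n) := by
  intro x hx
  simp only [List.length_range] at hx
  simp [pvPar, List.getD, List.getElem?_range hx, hx]

theorem pvInit_par (n : Nat) {x : Nat} (hx : x < n) : pvPar (List.range n) x = x := by
  simp [pvPar, List.getD, List.getElem?_range hx]

theorem pvInit_ev (n : Nat) : ∀ z, pvEvAt (List.range n) z := by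
  intro z
  by_cases hz : z < n
  · exact ⟨0, by simp [pvIt_zero, pvInit_par n hz]⟩
  · have h0 : pvPar (List.range n) z = 0 := by
      have hnone : (List.range n)[z]? = none := by
        rw [List.getElem?_eq_none_iff]
        simpa using hz
      simp [pvPar, List.getD, hnone]
    by_cases hn : 0 < n
    · exact ⟨1, by
        rw [show pvIt (List.range n) 1 z = pvPar (List.range n) z from rfl, h0, pvInit_par n hn]⟩
    · have hnil : (List.range n) = [] := by
        simp [List.range_eq_nil]; omega
      exact ⟨1, by
        rw [show pvIt (List.range n) 1 z = pvPar (List.range n) z from rfl, h0]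
        simp [pvPar, hnil, List.getD]⟩

theorem pvGroupFold {β : Type} (g : β → Nat → Nat → β)
    (step : (List Nat × β) → Nat → (List Nat × β))
    (hstep : ∀ p acc i, step (p, acc) i = ((pvFind p.length p i).1, g acc (pvFind p.length p i).2 i)) :
    ∀ (l : List Nat) (p : List Nat) (acc : β), pvRng p → (∀ z, pvEvAt p z) →
      (∀ i ∈ l, i < p.length) →
      (l.foldl step (p, acc)).2 = l.foldl (fun acc i => g acc (pvRoot p i) i) acc := by
  intro l
  induction l with
  | nil => intro p acc _ _ _; rfl
  | cons i l ih =>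
    intro p acc hr hev hbd
    have hi : i < p.length := hbd i (by simp)
    obtain ⟨h1, h2, h3, h4, h5⟩ := pvFind_spec p.length p i hr hev hi (pvDep_lt_len p hr (hev i) hi)
    have hbd' : ∀ j ∈ l, j < (pvFind p.length p i).1.length := by
      intro j hj; rw [h2]; exact hbd j (by simp [hj])
    calc ((i :: l).foldl step (p, acc)).2
        = (l.foldl step (step (p, acc) i)).2 := rfl
      _ = (l.foldl step ((pvFind p.length p i).1, g acc (pvRoot p i) i)).2 := by rw [hstep, h1]
      _ = l.foldl (fun acc j => g acc (pvRoot (pvFind p.length p i).1 j) j) (g acc (pvRoot p i) i) := by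
          exact ih _ _ h3 h4 hbd'
      _ = l.foldl (fun acc j => g acc (pvRoot p j) j) (g acc (pvRoot p i) i) := by
          congr 1
          funext acc j
          rw [h5 j]

theorem pvPureDictValues (r : Nat → Nat) (n : Nat) :
    ((List.range n).foldl (fun d i => d.modify (r i) [] (fun l => l ++ [i])) PySem.Dict.empty).values
      = (PySem.Set.ofList ((List.range n).map r)).map
          (fun k => (List.range n).filter (fun i => r i == k)) := by
  have hfold : (List.range n).foldl (fun d i => d.modify (r i) [] (fun l => l ++ [i])) PySem.Dict.empty
      = (((List.range n).map (fun i => (r i, i))).foldl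
          (fun d q => d.modify q.1 [] (fun l => l ++ [q.2])) PySem.Dict.empty) := by
    rw [List.foldl_map]
  set d := (List.range n).foldl (fun d i => d.modify (r i) [] (fun l => l ++ [i])) PySem.Dict.empty with hd
  have hnodup : d.keys.Nodup := by
    rw [hd]
    exact PySem.Dict.nodup_keys_foldl_modify_key _ _ _ _ _ PySem.Dict.nodup_keys_empty
  have hkeys : d.keys = PySem.Set.ofList ((List.range n).map r) := by
    rw [hd, PySem.Dict.keys_foldl_modify_key]
    rw [show (PySem.Dict.empty : PySem.Dict Nat (List Nat)).keys = [] from rfl]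
    exact PySem.Set.update_nil_left _
  have hgetD : ∀ k, d.getD k [] = (List.range n).filter (fun i => r i == k) := by
    intro k
    rw [hfold, PySem.Dict.getD_foldl_modify_append]
    rw [show (PySem.Dict.empty : PySem.Dict Nat (List Nat)).getD k [] = [] from rfl]
    rw [List.filter_map, List.map_map]
    rw [show ((fun (x : Nat × Nat) => x.2) ∘ fun i : Nat => (r i, i)) = (fun i : Nat => i) from rfl,
        show ((fun (p : Nat × Nat) => p.1 == k) ∘ fun i : Nat => (r i, i)) = (fun i : Nat => r i == k) from rfl]
    exact List.map_id' _
  rw [PySem.Dict.values_eq_map_keys d hnodup [], hkeys]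
  congr 1
  funext k
  exact hgetD k

def pvReps (r : Nat → Nat) (n : Nat) : List Nat :=
  (List.range n).filter (fun i => (List.range i).all (fun j => !(r j == r i)))

theorem pvSet_ofList_append_singleton {α : Type} [BEq α] (l : List α) (x : α) :
    PySem.Set.ofList (l ++ [x]) = PySem.Set.add (PySem.Set.ofList l) x := by
  rw [PySem.Set.ofList_eq_foldl, PySem.Set.ofList_eq_foldl, List.foldl_append]
  rfl

theorem pvRepsSet (r : Nat → Nat) (n : Nat) :
    PySem.Set.ofList ((List.range n).map r) = (pvReps r n).map r := by
  induction n with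
  | zero => rfl
  | succ m ih =>
    rw [List.range_succ, List.map_append, List.map_singleton, pvSet_ofList_append_singleton]
    unfold pvReps
    rw [List.range_succ, List.filter_append]
    by_cases hmem : r m ∈ (List.range m).map r
    · have hcont : PySem.Set.contains (PySem.Set.ofList ((List.range m).map r)) (r m) = true := by
        rw [PySem.Set.contains_iff, PySem.Set.mem_ofList]
        exact hmem
      have hadd : PySem.Set.add (PySem.Set.ofList ((List.range m).map r)) (r m)
          = PySem.Set.ofList ((List.range m).map r) := by
        unfold PySem.Set.add
        rw [hcont]
        simp
      have hpred : ((List.range m).all (fun j => !(r j == r m))) = false := by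
        obtain ⟨j, hj, hrj⟩ := List.mem_map.mp hmem
        rw [List.all_eq_false]
        exact ⟨j, hj, by simp [hrj]⟩
      rw [hadd, ih]
      have : ([m].filter (fun i => (List.range i).all (fun j => !(r j == r i)))) = [] := by
        simp [List.filter, hpred]
      rw [this, List.append_nil]
      rfl
    · have hcont : PySem.Set.contains (PySem.Set.ofList ((List.range m).map r)) (r m) = false := by
        rw [Bool.eq_false_iff]
        intro hc
        rw [PySem.Set.contains_iff, PySem.Set.mem_ofList] at hc
        exact hmem hc
      have hadd : PySem.Set.add (PySem.Set.ofList ((List.range m).map r)) (r m)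
          = PySem.Set.ofList ((List.range m).map r) ++ [r m] := by
        unfold PySem.Set.add
        rw [hcont]
        simp
      have hpred : ((List.range m).all (fun j => !(r j == r m))) = true := by
        rw [List.all_eq_true]
        intro j hj
        simp only [Bool.not_eq_eq_eq_not, Bool.not_true, beq_eq_false_iff_ne, ne_eq]
        intro hrj
        exact hmem (List.mem_map.mpr ⟨j, hj, hrj⟩)
      rw [hadd, ih]
      have : ([m].filter (fun i => (List.range i).all (fun j => !(r j == r i)))) = [m] := by
        simp [List.filter, hpred]
      rw [this, List.map_append]
      rfl

theorem pvGroupB_inv {γ : Type} (r : Nat → Nat) (item : Nat → γ) (m : Nat) :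
    (∀ k t, (((List.range m).foldl (fun (s : PySem.Dict Nat Nat × List (List γ)) i =>
        match s.1.get? (r i) with
        | some k => (s.1, s.2.set k (s.2.getD k [] ++ [item i]))
        | none => (s.1.insert (r i) s.2.length, s.2 ++ [[item i]]))
        (PySem.Dict.empty, [])).1.get? k = some t ↔
          (PySem.Set.ofList ((List.range m).map r))[t]? = some k)) ∧
    ((List.range m).foldl (fun (s : PySem.Dict Nat Nat × List (List γ)) i =>
        match s.1.get? (r i) with
        | some k => (s.1, s.2.set k (s.2.getD k [] ++ [item i]))
        | none => (s.1.insert (r i) s.2.length, s.2 ++ [[item i]]))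
        (PySem.Dict.empty, [])).2 = (PySem.Set.ofList ((List.range m).map r)).map
          (fun k => ((List.range m).filter (fun i => r i == k)).map item) := by
  induction m with
  | zero =>
    constructor
    · intro k t
      simp [PySem.Dict.get?_empty]
    · rfl
  | succ m ih =>
    obtain ⟨ih1, ih2⟩ := ih
    set step := (fun (s : PySem.Dict Nat Nat × List (List γ)) i =>
        match s.1.get? (r i) with
        | some k => (s.1, s.2.set k (s.2.getD k [] ++ [item i]))
        | none => (s.1.insert (r i) s.2.length, s.2 ++ [[item i]])) with hstep
    set st := (List.range m).foldl step (PySem.Dict.empty, ([] : List (List γ))) with hst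
    have hunfold : (List.range (m+1)).foldl step (PySem.Dict.empty, ([] : List (List γ)))
        = step st m := by
      rw [List.range_succ, List.foldl_append]
      rfl
    set S := PySem.Set.ofList ((List.range m).map r) with hS
    have hSnodup : S.Nodup := PySem.Set.nodup_ofList _
    set F := (fun k => ((List.range m).filter (fun i => r i == k)).map item) with hF
    set F' := (fun k => ((List.range (m+1)).filter (fun i => r i == k)).map item) with hF'
    have hFF' : ∀ k, F' k = F k ++ (if r m == k then [item m] else []) := by
      intro k
      simp only [hF', hF]
      rw [List.range_succ, List.filter_append, List.map_append]
      congr 1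
      by_cases h : r m == k
      · simp [List.filter, h]
      · simp only [Bool.not_eq_true] at h
        simp [List.filter, h]
    have hglen : st.2.length = S.length := by rw [ih2, List.length_map]
    have hS' : PySem.Set.ofList ((List.range (m+1)).map r)
        = PySem.Set.add S (r m) := by
      rw [List.range_succ, List.map_append, List.map_singleton, pvSet_ofList_append_singleton, hS]
    rw [hunfold]
    rcases hcase : st.1.get? (r m) with _ | t0
    · -- r m is a fresh root
      have hnotmem : r m ∉ S := by
        intro hmem
        obtain ⟨t, ht, hteq⟩ := List.mem_iff_getElem.mp hmem
        have := (ih1 (r m) t).mpr (by rw [List.getElem?_eq_getElem ht, hteq])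
        rw [hcase] at this
        simp at this
      have haddS : PySem.Set.add S (r m) = S ++ [r m] := by
        unfold PySem.Set.add
        rw [show PySem.Set.contains S (r m) = false from by
          rw [Bool.eq_false_iff]; intro hc; exact hnotmem ((PySem.Set.contains_iff _ _).mp hc)]
        simp
      have hstep2 : step st m = (st.1.insert (r m) st.2.length, st.2 ++ [[item m]]) := by
        rw [hstep]; simp only [hcase]
      rw [hstep2]
      constructor
      · intro k t
        rw [PySem.Dict.get?_insert, hS', haddS, hglen]
        by_cases hk : k = r m
        · subst hk
          rw [if_pos rfl]
          constructor
          · rintro h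
            have ht : t = S.length := by
              have := Option.some.inj h
              omega
            subst ht
            rw [List.getElem?_append_right (le_refl _)]
            simp
          · intro h
            by_cases ht : t < S.length
            · exfalso
              rw [List.getElem?_append_left ht, List.getElem?_eq_getElem ht] at h
              exact hnotmem (List.mem_iff_getElem.mpr ⟨t, ht, Option.some.inj h⟩)
            · by_cases ht2 : t = S.length
              · rw [ht2]
              · exfalso
                rw [List.getElem?_eq_none_iff.mpr (by simp; omega)] at h
                simp at h
        · rw [if_neg hk, ih1]
          constructor
          · intro h
            have ht : t < S.length := by
              by_contra hcon
              rw [List.getElem?_eq_none_iff.mpr (by omega)] at h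
              simp at h
            rw [List.getElem?_append_left ht]
            exact h
          · intro h
            by_cases ht : t < S.length
            · rw [List.getElem?_append_left ht] at h
              exact h
            · exfalso
              by_cases ht2 : t = S.length
              · subst ht2
                rw [List.getElem?_append_right (le_refl _)] at h
                simp at h
                exact hk h.symm
              · rw [List.getElem?_eq_none_iff.mpr (by simp; omega)] at h
                simp at h
      · rw [hS', haddS, ih2, List.map_append]
        have h1 : S.map F' = S.map F := by
          apply List.map_congr_left
          intro k hk
          rw [hFF' k, if_neg (by
            simp only [beq_iff_eq]
            intro heq
            exact hnotmem (by rw [heq]; exact hk))]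
          simp
        have h2 : F' (r m) = [[item m]].head (by simp) := by
          rw [hFF' (r m), if_pos (by simp)]
          have : F (r m) = [] := by
            simp only [hF]
            have : (List.range m).filter (fun i => r i == r m) = [] := by
              rw [List.filter_eq_nil_iff]
              intro i hi
              simp only [beq_iff_eq]
              intro heq
              exact hnotmem (by rw [hS, PySem.Set.mem_ofList]; exact List.mem_map.mpr ⟨i, hi, heq⟩)
            rw [this]
            rfl
          rw [this]
          rfl
        rw [← h1] at ih2 ⊢
        congr 1
        rw [List.map_singleton, h2]
        rfl
    · -- r m already has a group at index t0
      have hT := (ih1 (r m) t0).mp hcase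
      have ht0 : t0 < S.length := by
        by_contra hcon
        rw [List.getElem?_eq_none_iff.mpr (by omega)] at hT
        simp at hT
      have hSt0 : S[t0] = r m := by
        rw [List.getElem?_eq_getElem ht0] at hT
        exact Option.some.inj hT
      have hmem : r m ∈ S := List.mem_iff_getElem.mpr ⟨t0, ht0, hSt0⟩
      have haddS : PySem.Set.add S (r m) = S := by
        unfold PySem.Set.add
        rw [show PySem.Set.contains S (r m) = true from (PySem.Set.contains_iff _ _).mpr hmem]
        simp
      have hstep2 : step st m = (st.1, st.2.set t0 (st.2.getD t0 [] ++ [item m])) := by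
        rw [hstep]; simp only [hcase]
      rw [hstep2]
      constructor
      · intro k t
        rw [ih1, hS', haddS]
      · rw [hS', haddS]
        have hgetD : (List.map F S).getD t0 [] = F (r m) := by
          rw [List.getD_eq_getElem?_getD, List.getElem?_map,
            List.getElem?_eq_getElem ht0, hSt0]
          rfl
        rw [ih2, hgetD]
        apply List.ext_getElem
        · simp
        · intro u hu1 hu2
          rw [List.getElem_set]
          simp only [List.getElem_map]
          by_cases hu : u = t0
          · subst hu
            rw [if_pos rfl, hSt0, hFF' (r m), if_pos (by simp)]
          · have hulen : u < S.length := by simpa using hu1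
            rw [if_neg (by omega), hFF' (S[u]'hulen), if_neg (by
              simp only [beq_iff_eq]
              intro heq
              apply hu
              have heq2 : S[u]'hulen = S[t0] := by rw [hSt0, heq]
              exact (List.Nodup.getElem_inj_iff hSnodup).mp heq2)]
            simp

def pvFiles (af : List ((List (String × Int)) × List String)) (k : Nat) : List String :=
  (af.getD k ([],[])).2

def pvOvl (af : List ((List (String × Int)) × List String)) (u v : Nat) : Prop :=
  ∃ f, f ∈ pvFiles af u ∧ f ∈ pvFiles af v

def pvOvlm (af : List ((List (String × Int)) × List String)) (m u v : Nat) : Prop :=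
  u < m ∧ v < m ∧ pvOvl af u v

theorem pvInter_ne (s t : List String) : (PySem.Set.inter s t ≠ []) ↔ ∃ f, f ∈ s ∧ f ∈ t := by
  constructor
  · intro h
    obtain ⟨f, hf⟩ := List.exists_mem_of_ne_nil _ h
    exact ⟨f, (PySem.Set.mem_inter _ _ _).mp hf⟩
  · rintro ⟨f, h1, h2⟩ hnil
    have hm : f ∈ PySem.Set.inter s t := (PySem.Set.mem_inter _ _ _).mpr ⟨h1, h2⟩
    rw [hnil] at hm
    simp at hm

theorem eqvGen_mono_closure {R S : Nat → Nat → Prop} (h : ∀ u v, R u v → Relation.EqvGen S u v) :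
    ∀ {i j}, Relation.EqvGen R i j → Relation.EqvGen S i j := by
  intro i j hr
  induction hr with
  | rel u v huv => exact h u v huv
  | refl u => exact Relation.EqvGen.refl u
  | symm u v _ ih => exact Relation.EqvGen.symm _ _ ih
  | trans u v w _ _ ih1 ih2 => exact Relation.EqvGen.trans _ _ _ ih1 ih2

theorem pvUnionList_append (p : List Nat) (es1 es2 : List (Nat × Nat)) :
    pvUnionList p (es1 ++ es2) = pvUnionList (pvUnionList p es1) es2 := by
  unfold pvUnionList
  rw [List.foldl_append]

theorem pvFoldl_unionList (E : Nat → List (Nat × Nat)) :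
    ∀ (l : List Nat) (p : List Nat),
      l.foldl (fun p i => pvUnionList p (E i)) p = pvUnionList p (l.flatMap E) := by
  intro l
  induction l with
  | nil => intro p; rfl
  | cons i l ih =>
    intro p
    rw [List.foldl_cons, List.flatMap_cons, pvUnionList_append, ih]

def pvEdgesA (af : List ((List (String × Int)) × List String)) : List (Nat × Nat) :=
  (List.range af.length).flatMap (fun i =>
    ((List.range' (i+1) (af.length - (i+1))).filter
      (fun j => decide (PySem.Set.inter ((af.getD i ([],[])).2) ((af.getD j ([],[])).2) ≠ []))).map
      (fun j => (i, j)))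

theorem pvPhaseA_eq (af : List ((List (String × Int)) × List String)) :
    (List.range af.length).foldl (fun p i =>
        (List.range' (i+1) (af.length - (i+1))).foldl (fun p j =>
          if PySem.Set.inter ((af.getD i ([],[])).2) ((af.getD j ([],[])).2) ≠ []
          then pvUnion p i j else p) p)
      (List.range af.length)
    = pvUnionList (List.range af.length) (pvEdgesA af) := by
  have hinner : ∀ (p : List Nat) (i : Nat),
      (List.range' (i+1) (af.length - (i+1))).foldl (fun p j =>
        if PySem.Set.inter ((af.getD i ([],[])).2) ((af.getD j ([],[])).2) ≠ []
        then pvUnion p i j else p) p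
      = pvUnionList p (((List.range' (i+1) (af.length - (i+1))).filter
          (fun j => decide (PySem.Set.inter ((af.getD i ([],[])).2) ((af.getD j ([],[])).2) ≠ []))).map
          (fun j => (i, j))) := by
    intro p i
    rw [PySem.List.foldl_ite_eq_foldl_filter]
    unfold pvUnionList
    rw [List.foldl_map]
  calc (List.range af.length).foldl (fun p i =>
        (List.range' (i+1) (af.length - (i+1))).foldl (fun p j =>
          if PySem.Set.inter ((af.getD i ([],[])).2) ((af.getD j ((List.nil, List.nil) : (List (String × Int)) × List String)).2) ≠ []
          then pvUnion p i j else p) p) (List.range af.length)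
      = (List.range af.length).foldl (fun p i =>
          pvUnionList p (((List.range' (i+1) (af.length - (i+1))).filter
            (fun j => decide (PySem.Set.inter ((af.getD i ([],[])).2) ((af.getD j ([],[])).2) ≠ []))).map
            (fun j => (i, j)))) (List.range af.length) := by
        congr 1
        funext p i
        exact hinner p i
    _ = pvUnionList (List.range af.length) (pvEdgesA af) := by
        rw [pvFoldl_unionList]
        rfl

theorem pvEdgesA_bound (af : List ((List (String × Int)) × List String)) :
    ∀ e ∈ pvEdgesA af, e.1 < af.length ∧ e.2 < af.length := by
  intro e he
  unfold pvEdgesA at he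
  simp only [List.mem_flatMap, List.mem_map, List.mem_filter, List.mem_range, List.mem_range'] at he
  obtain ⟨i, hi, j, ⟨⟨hj1, hj2⟩, _⟩, rfl⟩ := he
  constructor
  · exact hi
  · simp only []
    omega

theorem pvPhaseA_spec (af : List ((List (String × Int)) × List String)) :
    (pvUnionList (List.range af.length) (pvEdgesA af)).length = af.length ∧
    pvRng (pvUnionList (List.range af.length) (pvEdgesA af)) ∧
    (∀ z, pvEvAt (pvUnionList (List.range af.length) (pvEdgesA af)) z) ∧
    (∀ i j, pvKer (pvUnionList (List.range af.length) (pvEdgesA af)) i j ↔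
      Relation.EqvGen (fun u v => pvKer (List.range af.length) u v ∨ pvOvlm af af.length u v) i j) := by
  have hbd : ∀ e ∈ pvEdgesA af, e.1 < (List.range af.length).length ∧ e.2 < (List.range af.length).length := by
    intro e he
    rw [List.length_range]
    exact pvEdgesA_bound af e he
  obtain ⟨h1, h2, h3, h4⟩ := pvUnionList_spec (pvEdgesA af) (List.range af.length)
    (pvInit_rng _) (pvInit_ev _) hbd
  rw [List.length_range] at h1
  refine ⟨h1, h2, h3, fun i j => ?_⟩
  rw [h4 i j]
  constructor
  · apply eqvGen_mono_closure
    intro u v huv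
    rcases huv with h | h
    · exact Relation.EqvGen.rel u v (Or.inl h)
    · apply Relation.EqvGen.rel u v
      right
      obtain ⟨i', hi', j', ⟨⟨hj1, hj2⟩, hc⟩, he⟩ := by
        unfold pvEdgesA at h
        simpa only [List.mem_flatMap, List.mem_map, List.mem_filter, List.mem_range,
          List.mem_range'_1] using h
      injection he with he1 he2
      subst he1; subst he2
      refine ⟨hi', by omega, ?_⟩
      rw [decide_eq_true_iff, pvInter_ne] at hc
      exact hc
  · apply eqvGen_mono_closure
    intro u v huv
    rcases huv with h | ⟨hu, hv, f, hf1, hf2⟩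
    · exact Relation.EqvGen.rel u v (Or.inl h)
    · have hedge : ∀ a b, a < b → b < af.length → (∃ f, f ∈ pvFiles af a ∧ f ∈ pvFiles af b) →
          (a, b) ∈ pvEdgesA af := by
        intro a b hab hbn hex
        unfold pvEdgesA
        simp only [List.mem_flatMap, List.mem_map, List.mem_filter, List.mem_range, List.mem_range'_1]
        exact ⟨a, by omega, b, ⟨⟨by omega, by omega⟩, by
          rw [decide_eq_true_iff, pvInter_ne]; exact hex⟩, rfl⟩
      rcases Nat.lt_trichotomy u v with hlt | heq | hgt
      · exact Relation.EqvGen.rel u v (Or.inr (hedge u v hlt hv ⟨f, hf1, hf2⟩))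
      · rw [heq]; exact Relation.EqvGen.refl v
      · exact Relation.EqvGen.symm _ _
          (Relation.EqvGen.rel v u (Or.inr (hedge v u hgt hu ⟨f, hf2, hf1⟩)))

def pvFH (af : List ((List (String × Int)) × List String)) (m : Nat) (f : String) (j : Nat) : Prop :=
  j < m ∧ f ∈ pvFiles af j ∧ ∀ j' < j, f ∉ pvFiles af j'

theorem pvFH_exists (af : List ((List (String × Int)) × List String)) (m : Nat) (f : String)
    (h : ∃ j, j < m ∧ f ∈ pvFiles af j) : ∃ j0, pvFH af m f j0 := by
  obtain ⟨j, hj, hf⟩ := h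
  have hex : ∃ j, f ∈ pvFiles af j := ⟨j, hf⟩
  refine ⟨Nat.find hex, ?_, Nat.find_spec hex, ?_⟩
  · exact lt_of_le_of_lt (Nat.find_le hf) hj
  · intro j' hj'
    exact Nat.find_min hex hj'

def pvGenB (af : List ((List (String × Int)) × List String)) (m : Nat) (P : List String)
    (u v : Nat) : Prop :=
  pvKer (List.range af.length) u v ∨ pvOvlm af m u v ∨
    (v = m ∧ u ≤ m ∧ ∃ f ∈ P, f ∈ pvFiles af u)

def pvStepB (m : Nat) (t : List Nat × PySem.Dict String Nat) (f : String) :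
    List Nat × PySem.Dict String Nat :=
  match t.2.get? f with
  | some j => (pvUnion t.1 j m, t.2)
  | none => (t.1, t.2.insert f m)

theorem pvInnerB (af : List ((List (String × Int)) × List String)) (m : Nat) (hm : m < af.length) :
    ∀ (fs P : List String) (p : List Nat) (d : PySem.Dict String Nat),
    pvFiles af m = P ++ fs →
    p.length = af.length → pvRng p → (∀ z, pvEvAt p z) →
    (∀ f j, d.get? f = some j ↔ (pvFH af m f j ∨
      (j = m ∧ f ∈ P ∧ ¬ ∃ j', j' < m ∧ f ∈ pvFiles af j'))) →
    (∀ i j, pvKer p i j ↔ Relation.EqvGen (pvGenB af m P) i j) →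
    (fs.foldl (pvStepB m) (p, d)).1.length = af.length ∧
    pvRng (fs.foldl (pvStepB m) (p, d)).1 ∧
    (∀ z, pvEvAt (fs.foldl (pvStepB m) (p, d)).1 z) ∧
    (∀ f j, (fs.foldl (pvStepB m) (p, d)).2.get? f = some j ↔ (pvFH af m f j ∨
      (j = m ∧ f ∈ P ++ fs ∧ ¬ ∃ j', j' < m ∧ f ∈ pvFiles af j'))) ∧
    (∀ i j, pvKer (fs.foldl (pvStepB m) (p, d)).1 i j ↔
      Relation.EqvGen (pvGenB af m (P ++ fs)) i j) := by
  intro fs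
  induction fs with
  | nil =>
    intro P p d hsplit hlen hr hev hdict hker
    simp only [List.foldl_nil, List.append_nil]
    exact ⟨hlen, hr, hev, hdict, hker⟩
  | cons f fs ih =>
    intro P p d hsplit hlen hr hev hdict hker
    have hsplit' : pvFiles af m = (P ++ [f]) ++ fs := by
      rw [hsplit, List.append_assoc]
      rfl
    have hfmem : f ∈ pvFiles af m := by rw [hsplit]; simp
    rcases hd : d.get? f with _ | j0
    · -- fresh file: insert, no union
      have hno : ¬ ∃ j', j' < m ∧ f ∈ pvFiles af j' := by
        intro hex
        obtain ⟨j0, hFH⟩ := pvFH_exists af m f hex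
        have := (hdict f j0).mpr (Or.inl hFH)
        rw [hd] at this
        simp at this
      have hstep : (f :: fs).foldl (pvStepB m) (p, d)
          = fs.foldl (pvStepB m) (p, d.insert f m) := by
        rw [List.foldl_cons]
        simp only [pvStepB, hd]
      rw [hstep]
      have hdict' : ∀ f' j, (d.insert f m).get? f' = some j ↔ (pvFH af m f' j ∨
          (j = m ∧ f' ∈ P ++ [f] ∧ ¬ ∃ j', j' < m ∧ f' ∈ pvFiles af j')) := by
        intro f' j
        rw [PySem.Dict.get?_insert]
        by_cases hf' : f' = f
        · subst hf'
          rw [if_pos rfl]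
          constructor
          · intro h
            have hj : j = m := by
              have := Option.some.inj h
              omega
            exact Or.inr ⟨hj, by simp, hno⟩
          · rintro (hFH | ⟨rfl, _, _⟩)
            · exact absurd ⟨_, hFH.1, hFH.2.1⟩ hno
            · rfl
        · rw [if_neg hf', hdict f' j]
          constructor
          · rintro (h | ⟨rfl, hP, hn⟩)
            · exact Or.inl h
            · exact Or.inr ⟨rfl, by simp [hP], hn⟩
          · rintro (h | ⟨rfl, hP, hn⟩)
            · exact Or.inl h
            · refine Or.inr ⟨rfl, ?_, hn⟩
              rcases List.mem_append.mp hP with h1 | h1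
              · exact h1
              · exact absurd (List.mem_singleton.mp h1) hf'
      have hker' : ∀ i j, pvKer p i j ↔ Relation.EqvGen (pvGenB af m (P ++ [f])) i j := by
        intro i j
        rw [hker i j]
        constructor
        · apply eqvGen_mono_closure
          intro u v huv
          apply Relation.EqvGen.rel
          rcases huv with h | h | ⟨hveq, hu, g, hg1, hg2⟩
          · exact Or.inl h
          · exact Or.inr (Or.inl h)
          · exact Or.inr (Or.inr ⟨hveq, hu, g, by simp [hg1], hg2⟩)
        · apply eqvGen_mono_closure
          intro u v huv
          rcases huv with h | h | ⟨hveq, hu, g, hg1, hg2⟩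
          · exact Relation.EqvGen.rel _ _ (Or.inl h)
          · exact Relation.EqvGen.rel _ _ (Or.inr (Or.inl h))
          · rcases List.mem_append.mp hg1 with h1 | h1
            · exact Relation.EqvGen.rel _ _ (Or.inr (Or.inr ⟨hveq, hu, g, h1, hg2⟩))
            · -- g = f : u then cannot be < m, so u = m and this is refl
              have hgf : g = f := List.mem_singleton.mp h1
              subst hgf
              have hum : u = m := by
                rcases Nat.lt_or_ge u m with h2 | h2
                · exact absurd ⟨u, h2, hg2⟩ hno
                · omega
              rw [hum, hveq]
              exact Relation.EqvGen.refl m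
      have hlapp : P ++ f :: fs = (P ++ [f]) ++ fs := by simp
      rw [hlapp]
      exact ih (P ++ [f]) p (d.insert f m) hsplit' hlen hr hev hdict' hker'
    · -- existing holder j0 : union
      have hcond := (hdict f j0).mp hd
      have hj0m : j0 ≤ m := by
        rcases hcond with h | h
        · exact Nat.le_of_lt h.1
        · exact Nat.le_of_eq h.1
      have hj0 : j0 < p.length := by rw [hlen]; omega
      have hmp : m < p.length := by rw [hlen]; exact hm
      obtain ⟨hu1, hu2, hu3, hu4⟩ := pvUnion_spec p j0 m hr hev hj0 hmp
      have hstep : (f :: fs).foldl (pvStepB m) (p, d)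
          = fs.foldl (pvStepB m) (pvUnion p j0 m, d) := by
        rw [List.foldl_cons]
        simp only [pvStepB, hd]
      rw [hstep]
      have hdict' : ∀ f' j, d.get? f' = some j ↔ (pvFH af m f' j ∨
          (j = m ∧ f' ∈ P ++ [f] ∧ ¬ ∃ j', j' < m ∧ f' ∈ pvFiles af j')) := by
        intro f' j
        rw [hdict f' j]
        by_cases hf' : f' = f
        · subst hf'
          constructor
          · rintro (h | ⟨rfl, hP, hn⟩)
            · exact Or.inl h
            · exact Or.inr ⟨rfl, by simp, hn⟩
          · rintro (h | ⟨rfl, hP, hn⟩)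
            · exact Or.inl h
            · -- f has no earlier holder; d.get? f = some j0 forces j0 = m with f ∈ P
              rcases hcond with hFH | ⟨hj0e, hfP, _⟩
              · exact absurd ⟨j0, hFH.1, hFH.2.1⟩ hn
              · exact Or.inr ⟨rfl, hfP, hn⟩
        · constructor
          · rintro (h | ⟨rfl, hP, hn⟩)
            · exact Or.inl h
            · exact Or.inr ⟨rfl, by simp [hP], hn⟩
          · rintro (h | ⟨rfl, hP, hn⟩)
            · exact Or.inl h
            · refine Or.inr ⟨rfl, ?_, hn⟩
              rcases List.mem_append.mp hP with h1 | h1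
              · exact h1
              · exact absurd (List.mem_singleton.mp h1) hf'
      have hker' : ∀ i j, pvKer (pvUnion p j0 m) i j ↔
          Relation.EqvGen (pvGenB af m (P ++ [f])) i j := by
        intro i j
        rw [pvUnion_ker p j0 m hr hev hj0 hmp i j]
        have hcg : ∀ u v, (pvKer p u v ∨ (u = j0 ∧ v = m)) ↔
            (Relation.EqvGen (pvGenB af m P) u v ∨ (u = j0 ∧ v = m)) :=
          fun u v => or_congr_left (hker u v)
        rw [eqvGen_congr hcg, eqvGen_collapse]
        constructor
        · apply eqvGen_mono_closure
          intro u v huv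
          rcases huv with (h | h | ⟨hveq, hu, g, hg1, hg2⟩) | ⟨hueq, hveq2⟩
          · exact Relation.EqvGen.rel _ _ (Or.inl h)
          · exact Relation.EqvGen.rel _ _ (Or.inr (Or.inl h))
          · exact Relation.EqvGen.rel _ _ (Or.inr (Or.inr ⟨hveq, hu, g, by simp [hg1], hg2⟩))
          · -- the union edge (j0, m) is inside the closure of pvGenB (P ++ [f])
            rcases hcond with hFH | ⟨hj0e, hfP, _⟩
            · exact Relation.EqvGen.rel _ _ (Or.inr (Or.inr ⟨hveq2, by omega, f, by simp,
                by rw [hueq]; exact hFH.2.1⟩))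
            · rw [hueq, hj0e, hveq2]
              exact Relation.EqvGen.refl m
        · apply eqvGen_mono_closure
          intro u v huv
          rcases huv with h | h | ⟨hveq, hu, g, hg1, hg2⟩
          · exact Relation.EqvGen.rel _ _ (Or.inl (Or.inl h))
          · exact Relation.EqvGen.rel _ _ (Or.inl (Or.inr (Or.inl h)))
          · rcases List.mem_append.mp hg1 with h1 | h1
            · exact Relation.EqvGen.rel _ _ (Or.inl (Or.inr (Or.inr ⟨hveq, hu, g, h1, hg2⟩)))
            · -- g = f : u is linked to m through the holder j0
              have hgf : g = f := List.mem_singleton.mp h1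
              rw [hgf] at hg2
              have hedge : Relation.EqvGen (fun u v => pvGenB af m P u v ∨ (u = j0 ∧ v = m)) j0 m :=
                Relation.EqvGen.rel _ _ (Or.inr ⟨rfl, rfl⟩)
              rw [hveq]
              by_cases hum : u = m
              · rw [hum]; exact Relation.EqvGen.refl m
              · have hul : u < m := by omega
                -- u and j0 both hold f (or j0 = m with f ∈ P)
                rcases hcond with hFH | ⟨hj0e, hfP, hnn⟩
                · have hlink : Relation.EqvGen (fun u v => pvGenB af m P u v ∨ (u = j0 ∧ v = m)) u j0 :=
                    Relation.EqvGen.rel _ _ (Or.inl (Or.inr (Or.inl ⟨hul, hFH.1, f, hg2, hFH.2.1⟩)))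
                  exact Relation.EqvGen.trans _ _ _ hlink hedge
                · exact absurd ⟨u, hul, hg2⟩ hnn
      have hlapp : P ++ f :: fs = (P ++ [f]) ++ fs := by simp
      rw [hlapp]
      exact ih (P ++ [f]) (pvUnion p j0 m) d hsplit' (by rw [hu1, hlen]) hu2 hu3 hdict' hker'

def pvOuterB (s : Nat × List Nat × PySem.Dict String Nat)
    (a : (List (String × Int)) × List String) : Nat × List Nat × PySem.Dict String Nat :=
  (s.1 + 1, a.2.foldl (pvStepB s.1) s.2)

theorem pvFiles_oob (af : List ((List (String × Int)) × List String)) {u : Nat}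
    (hu : af.length ≤ u) : pvFiles af u = [] := by
  unfold pvFiles
  rw [List.getD_eq_getElem?_getD, List.getElem?_eq_none_iff.mpr (by omega)]
  rfl

theorem pvFiles_mem_lt (af : List ((List (String × Int)) × List String)) {u : Nat} {f : String}
    (hf : f ∈ pvFiles af u) : u < af.length := by
  by_contra hcon
  rw [pvFiles_oob af (by omega)] at hf
  simp at hf

theorem pvFH_succ (af : List ((List (String × Int)) × List String)) (m : Nat) (f : String) (j : Nat) :
    pvFH af (m+1) f j ↔ (pvFH af m f j ∨
      (j = m ∧ f ∈ pvFiles af m ∧ ¬ ∃ j', j' < m ∧ f ∈ pvFiles af j')) := by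
  unfold pvFH
  constructor
  · rintro ⟨hj, hf, hmin⟩
    by_cases hjm : j < m
    · exact Or.inl ⟨hjm, hf, hmin⟩
    · have hje : j = m := by omega
      subst hje
      refine Or.inr ⟨rfl, hf, ?_⟩
      rintro ⟨j', hj', hf'⟩
      exact hmin j' hj' hf'
  · rintro (⟨hj, hf, hmin⟩ | ⟨rfl, hf, hno⟩)
    · exact ⟨by omega, hf, hmin⟩
    · refine ⟨by omega, hf, ?_⟩
      intro j' hj' hf'
      exact hno ⟨j', hj', hf'⟩

theorem pvOuterB_spec (af : List ((List (String × Int)) × List String)) :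
    ∀ (suff : List ((List (String × Int)) × List String)) (m : Nat) (p : List Nat)
      (d : PySem.Dict String Nat),
    af.drop m = suff →
    p.length = af.length → pvRng p → (∀ z, pvEvAt p z) →
    (∀ f j, d.get? f = some j ↔ pvFH af m f j) →
    (∀ i j, pvKer p i j ↔ Relation.EqvGen (fun u v =>
      pvKer (List.range af.length) u v ∨ pvOvlm af m u v) i j) →
    (suff.foldl pvOuterB (m, p, d)).2.1.length = af.length ∧
    pvRng (suff.foldl pvOuterB (m, p, d)).2.1 ∧
    (∀ z, pvEvAt (suff.foldl pvOuterB (m, p, d)).2.1 z) ∧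
    (∀ i j, pvKer (suff.foldl pvOuterB (m, p, d)).2.1 i j ↔ Relation.EqvGen (fun u v =>
      pvKer (List.range af.length) u v ∨ pvOvlm af af.length u v) i j) := by
  intro suff
  induction suff with
  | nil =>
    intro m p d hdrop hlen hr hev hdict hker
    have hm : af.length ≤ m := by
      rw [← List.drop_eq_nil_iff]
      exact hdrop
    simp only [List.foldl_nil]
    refine ⟨hlen, hr, hev, fun i j => ?_⟩
    rw [hker i j]
    apply eqvGen_congr
    intro u v
    apply or_congr_right
    unfold pvOvlm
    constructor
    · rintro ⟨hu, hv, f, hf1, hf2⟩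
      exact ⟨pvFiles_mem_lt af hf1, pvFiles_mem_lt af hf2, f, hf1, hf2⟩
    · rintro ⟨hu, hv, hov⟩
      exact ⟨by omega, by omega, hov⟩
  | cons a suff ih =>
    intro m p d hdrop hlen hr hev hdict hker
    have hm : m < af.length := by
      by_contra hcon
      rw [List.drop_eq_nil_iff.mpr (by omega)] at hdrop
      simp at hdrop
    have hga : af[m]? = some a := by
      have h0 : (af.drop m)[0]? = some a := by rw [hdrop]; rfl
      rw [List.getElem?_drop] at h0
      simpa using h0
    have hfiles : pvFiles af m = a.2 := by
      unfold pvFiles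
      rw [List.getD_eq_getElem?_getD, hga]
      rfl
    have hstep : (a :: suff).foldl pvOuterB (m, p, d)
        = suff.foldl pvOuterB (m + 1, a.2.foldl (pvStepB m) (p, d)) := rfl
    rw [hstep]
    have hdict0 : ∀ f j, d.get? f = some j ↔ (pvFH af m f j ∨
        (j = m ∧ f ∈ ([] : List String) ∧ ¬ ∃ j', j' < m ∧ f ∈ pvFiles af j')) := by
      intro f j
      rw [hdict f j]
      constructor
      · exact Or.inl
      · rintro (h | ⟨_, h, _⟩)
        · exact h
        · simp at h
    have hker0 : ∀ i j, pvKer p i j ↔ Relation.EqvGen (pvGenB af m []) i j := by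
      intro i j
      rw [hker i j]
      apply eqvGen_congr
      intro u v
      unfold pvGenB
      constructor
      · rintro (h | h)
        · exact Or.inl h
        · exact Or.inr (Or.inl h)
      · rintro (h | h | ⟨_, _, f, hf, _⟩)
        · exact Or.inl h
        · exact Or.inr h
        · simp at hf
    obtain ⟨k1, k2, k3, k4, k5⟩ := pvInnerB af m hm a.2 [] p d (by rw [hfiles]; rfl)
      hlen hr hev hdict0 hker0
    have hd1 : ∀ f j, (a.2.foldl (pvStepB m) (p, d)).2.get? f = some j ↔ pvFH af (m+1) f j := by
      intro f j
      rw [k4 f j, pvFH_succ af m f j]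
      apply or_congr_right
      rw [List.nil_append, ← hfiles]
    have hk1 : ∀ i j, pvKer (a.2.foldl (pvStepB m) (p, d)).1 i j ↔ Relation.EqvGen (fun u v =>
        pvKer (List.range af.length) u v ∨ pvOvlm af (m+1) u v) i j := by
      intro i j
      rw [k5 i j]
      rw [show ([] : List String) ++ a.2 = a.2 from rfl]
      constructor
      · apply eqvGen_mono_closure
        intro u v huv
        rcases huv with h | h | ⟨hveq, hu, f, hf1, hf2⟩
        · exact Relation.EqvGen.rel _ _ (Or.inl h)
        · exact Relation.EqvGen.rel _ _ (Or.inr ⟨by have := h.1; omega, by have := h.2.1; omega, h.2.2⟩)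
        · refine Relation.EqvGen.rel _ _ (Or.inr ⟨by omega, by omega, f, hf2, ?_⟩)
          rw [hveq, hfiles]
          exact hf1
      · apply eqvGen_mono_closure
        intro u v huv
        rcases huv with h | ⟨hu, hv, f, hf1, hf2⟩
        · exact Relation.EqvGen.rel _ _ (Or.inl h)
        · by_cases hvm : v = m
          · refine Relation.EqvGen.rel _ _ (Or.inr (Or.inr ⟨hvm, by omega, f, ?_, hf1⟩))
            rw [← hfiles, ← hvm]
            exact hf2
          · by_cases hum : u = m
            · apply Relation.EqvGen.symm
              refine Relation.EqvGen.rel _ _ (Or.inr (Or.inr ⟨hum, by omega, f, ?_, hf2⟩))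
              rw [← hfiles, ← hum]
              exact hf1
            · exact Relation.EqvGen.rel _ _ (Or.inr (Or.inl ⟨by omega, by omega, f, hf1, hf2⟩))
    have hdrop' : af.drop (m + 1) = suff := by
      have h1 : (af.drop m).drop 1 = af.drop (m + 1) := by
        rw [List.drop_drop]
      rw [← h1, hdrop]
      rfl
    exact ih (m + 1) (a.2.foldl (pvStepB m) (p, d)).1 (a.2.foldl (pvStepB m) (p, d)).2
      hdrop' k1 k2 k3 hd1 hk1



theorem ports_equal (af : List ((List (String × Int)) × List String)) :
    group_by_file_overlap_py af = group_by_file_overlap_py_alt af := by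
  by_cases hn : af.length = 0
  · unfold group_by_file_overlap_py group_by_file_overlap_py_alt
    simp [hn]
  · unfold group_by_file_overlap_py group_by_file_overlap_py_alt
    simp only [if_neg hn]
    -- ===== A side =====
    rw [pvPhaseA_eq af]
    obtain ⟨a1, a2, a3, a4⟩ := pvPhaseA_spec af
    set pA := pvUnionList (List.range af.length) (pvEdgesA af) with hpA
    set rA := fun i => pvRoot pA i with hrA
    have hAgroup : ((List.range af.length).foldl (fun (s : List Nat × PySem.Dict Nat (List Nat)) i =>
        let fr := pvFind s.1.length s.1 i
        (fr.1, s.2.modify fr.2 [] (fun l => l ++ [i]))) (pA, PySem.Dict.empty)).2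
        = (List.range af.length).foldl (fun d i => d.modify (rA i) [] (fun l => l ++ [i]))
            PySem.Dict.empty := by
      exact pvGroupFold (fun d r i => d.modify r [] (fun l => l ++ [i]))
        (fun (s : List Nat × PySem.Dict Nat (List Nat)) i =>
          let fr := pvFind s.1.length s.1 i
          (fr.1, s.2.modify fr.2 [] (fun l => l ++ [i])))
        (fun p acc i => rfl) (List.range af.length) pA PySem.Dict.empty a2 a3
        (by intro i hi; rw [a1]; simpa using hi)
    rw [hAgroup, pvPureDictValues rA af.length, List.map_map, pvRepsSet rA af.length, List.map_map]
    -- ===== B side =====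
    have houter : (fun (s : Nat × List Nat × PySem.Dict String Nat) a =>
        (s.1 + 1, a.2.foldl (fun (t : List Nat × PySem.Dict String Nat) f =>
          match t.2.get? f with
          | some j => (pvUnion t.1 j s.1, t.2)
          | none => (t.1, t.2.insert f s.1)) s.2)) = pvOuterB := by
      funext s a
      unfold pvOuterB
      have hlam : (fun (t : List Nat × PySem.Dict String Nat) f =>
          match t.2.get? f with
          | some j => (pvUnion t.1 j s.1, t.2)
          | none => (t.1, t.2.insert f s.1)) = pvStepB s.1 := by
        funext t f
        unfold pvStepB
        rfl
      rw [hlam]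
    rw [houter]
    obtain ⟨b1, b2, b3, b4⟩ := pvOuterB_spec af af 0 (List.range af.length) PySem.Dict.empty
      (by rfl) (by rw [List.length_range]) (pvInit_rng _) (pvInit_ev _)
      (by
        intro f j
        rw [show (PySem.Dict.empty : PySem.Dict String Nat).get? f = none from rfl]
        unfold pvFH
        constructor
        · intro h; simp at h
        · rintro ⟨h, _⟩; omega)
      (by
        intro i j
        rw [eqvGen_congr (R' := pvKer (List.range af.length)) (fun u v => by
          unfold pvOvlm
          constructor
          · rintro (h | ⟨h, _⟩)
            · exact h
            · omega
          · exact Or.inl), eqvGen_of_equivalence (pvKer_equiv _)])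
    set pB := (af.foldl pvOuterB (0, List.range af.length, PySem.Dict.empty)).2.1 with hpB
    set rB := fun i => pvRoot pB i with hrB
    have hBgroup : ((List.range af.length).foldl
        (fun (s : List Nat × PySem.Dict Nat Nat × List (List ((List (String × Int)) × List String))) i =>
          let fr := pvFind s.1.length s.1 i
          match s.2.1.get? fr.2 with
          | some k => (fr.1, s.2.1, s.2.2.set k (s.2.2.getD k [] ++ [af.getD i ([],[])]))
          | none => (fr.1, s.2.1.insert fr.2 s.2.2.length, s.2.2 ++ [[af.getD i ([],[])]]))
        (pB, PySem.Dict.empty, [])).2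
        = (List.range af.length).foldl
            (fun (s : PySem.Dict Nat Nat × List (List ((List (String × Int)) × List String))) i =>
              match s.1.get? (rB i) with
              | some k => (s.1, s.2.set k (s.2.getD k [] ++ [af.getD i ([],[])]))
              | none => (s.1.insert (rB i) s.2.length, s.2 ++ [[af.getD i ([],[])]]))
            (PySem.Dict.empty, []) := by
      exact pvGroupFold
        (fun (acc : PySem.Dict Nat Nat × List (List ((List (String × Int)) × List String))) r i =>
          match acc.1.get? r with
          | some k => (acc.1, acc.2.set k (acc.2.getD k [] ++ [af.getD i ([],[])]))
          | none => (acc.1.insert r acc.2.length, acc.2 ++ [[af.getD i ([],[])]]))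
        (fun (s : List Nat × PySem.Dict Nat Nat × List (List ((List (String × Int)) × List String))) i =>
          let fr := pvFind s.1.length s.1 i
          match s.2.1.get? fr.2 with
          | some k => (fr.1, s.2.1, s.2.2.set k (s.2.2.getD k [] ++ [af.getD i ([],[])]))
          | none => (fr.1, s.2.1.insert fr.2 s.2.2.length, s.2.2 ++ [[af.getD i ([],[])]]))
        (by
          intro p acc i
          rcases h : acc.1.get? (pvFind p.length p i).2 with _ | k <;> simp [h]) 
        (List.range af.length) pB (PySem.Dict.empty, []) b2 b3
        (by intro i hi; rw [b1]; simpa using hi)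
    rw [hBgroup, (pvGroupB_inv rB (fun i => af.getD i ([],[])) af.length).2,
      pvRepsSet rB af.length, List.map_map]
    -- ===== kernels agree, hence identical grouping =====
    have hker : ∀ i j, rA i = rA j ↔ rB i = rB j := by
      intro i j
      have h1 := a4 i j
      have h2 := b4 i j
      unfold pvKer at h1 h2
      rw [hrA, hrB]
      simp only []
      rw [h1, ← h2]
    have hbeq : ∀ i j, (rA j == rA i) = (rB j == rB i) := by
      intro i j
      by_cases h : rA j = rA i
      · have h2 := (hker j i).mp h
        simp [h, h2]
      · have h2 : ¬ rB j = rB i := fun hc => h ((hker j i).mpr hc)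
        simp [h, h2]
    have hreps : pvReps rA af.length = pvReps rB af.length := by
      unfold pvReps
      apply List.filter_congr
      intro i _
      congr 1
      funext j
      rw [hbeq i j]
    rw [hreps]
    apply List.map_congr_left
    intro i0 _
    simp only [Function.comp]
    congr 1
    apply List.filter_congr
    intro i _
    rw [hbeq i0 i]

-- ===== VERDICT (by name: the statement is the Claim_ definition above) =====
theorem group_by_file_overlap_py_spec : Claim_equal_group_by_file_overlap_py := by
  intro af _
  unfold Spec_group_by_file_overlap_py
  exact ports_equal af
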